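-- pv_equiv track=rewrite | github.com/DmitriyBeresnev/GeeksForGeeksPractice | 2021/October/Day10/ValidPairSum.py | ValidPair2
-- ===== SOURCE A (Python) =====
-- from typing import List
--
-- def ValidPair2(a: List[int], n: int) -> int:
--     # Your code goes here
--     res = 0
--     sortedArr = sorted(a)
--     for i in range(0, n):
--         if sortedArr[i] > 0:
--             j = i-1
--             while abs(sortedArr[j]) < sortedArr[i]:
--                 j -= 1
--             res += i - j - 1
--     return res
-- ===== SOURCE B (Python) =====
-- from bisect import bisect_right
--
--
-- def ValidPair2(a, n):
--     # One pass over the sorted prefix; each distinct positive value is counted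
--     # once (at its first sorted position) via a binary search instead of A's
--     # backward linear scan.
--     s = sorted(a)
--     res = 0
--     prev = None
--     for i in range(n):
--         v = s[i]
--         if v > 0 and prev != v:
--             res += i - bisect_right(s, -v, 0, i)
--         prev = v
--     return res
-- ===== Notes on version B (the rewrite author's own statement) =====
-- stated objective: alternative
-- what changed: A's inner backward linear scan over the sorted array is replaced by a single forward pass that, at the first sorted position of each distinct positive value v, counts the elements below it that exceed -v with one bisect_right binary search; later duplicates of v contribute nothing, as in A.
import Mathlib
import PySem

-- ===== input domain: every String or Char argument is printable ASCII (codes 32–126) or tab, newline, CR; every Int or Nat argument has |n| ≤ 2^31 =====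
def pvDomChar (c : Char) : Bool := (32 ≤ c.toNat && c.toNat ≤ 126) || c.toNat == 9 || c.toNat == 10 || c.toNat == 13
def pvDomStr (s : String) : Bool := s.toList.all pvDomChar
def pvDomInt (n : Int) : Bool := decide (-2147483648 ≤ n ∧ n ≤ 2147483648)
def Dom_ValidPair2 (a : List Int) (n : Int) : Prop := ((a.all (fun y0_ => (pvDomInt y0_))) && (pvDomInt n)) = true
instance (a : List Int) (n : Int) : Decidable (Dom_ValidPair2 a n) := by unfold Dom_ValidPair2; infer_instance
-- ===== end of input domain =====

-- B replaces A's per-element backward linear scan with one binary search per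
-- distinct positive value (counted at its first sorted position): a different
-- inner mechanism over the same sorted array.

-- ===== PORT A =====
-- the inner 'while abs(sortedArr[j]) < sortedArr[i]: j -= 1' loop; fuel only makes the
-- recursion total (under Pre_ the loop always stops at j ≥ -1, so fuel is never exhausted)
def ValidPair2While (s : List Int) (v : Int) (j : Int) : Nat → Int
  | 0 => j
  | fuel + 1 =>
    match PySem.List.pyGet? s j with
    | none => j  -- Python would raise IndexError; unreachable under Pre_
    | some x => if |x| < v then ValidPair2While s v (j - 1) fuel else j

def ValidPair2 (a : List Int) (n : Int) : Int :=
  let sortedArr := PySem.List.sorted a (fun x => x) false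
  (PySem.List.pyRange 0 n 1).foldl
    (fun res i =>
      match PySem.List.pyGet? sortedArr i with
      | none => res  -- Python raises IndexError here; unreachable under Pre_
      | some v =>
        if v > 0 then
          let j := ValidPair2While sortedArr v (i - 1) (sortedArr.length + 2)
          res + (i - j - 1)
        else res) 0

-- ===== PORT B =====
-- bisect_right(s, x, 0, i) on the sorted s is ported as bisectRight on the prefix s.take i
-- (exact: same insertion point within [0, i] for a sorted list)
def ValidPair2_alt (a : List Int) (n : Int) : Int :=
  let s := PySem.List.sorted a (fun x => x) false
  ((PySem.List.pyRange 0 n 1).foldl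
    (fun st i =>
      match PySem.List.pyGet? s i with
      | none => st  -- Python raises IndexError here; unreachable under Pre_
      | some v =>
        (if v > 0 ∧ st.2 ≠ some v then
           st.1 + (i - (PySem.List.bisectRight (s.take i.toNat) (-v) : Int))
         else st.1, some v))
    ((0 : Int), (none : Option Int))).1

-- ===== PRECONDITION & SPEC =====
-- A raises IndexError when n > len(a) (it reads sorted(a)[i] for every i < n); those inputs are excluded.
def Pre_ValidPair2 (a : List Int) (n : Int) : Prop := n ≤ (a.length : Int)
instance (a : List Int) (n : Int) : Decidable (Pre_ValidPair2 a n) := by unfold Pre_ValidPair2; infer_instance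
def pvWitness_ValidPair2 : List Int × Int := ([3, -1, 2, -4, 2], 5)

def Spec_ValidPair2 (a : List Int) (n : Int) (out : Int) : Prop := out = ValidPair2_alt a n
instance (a : List Int) (n : Int) (out : Int) : Decidable (Spec_ValidPair2 a n out) := by unfold Spec_ValidPair2; infer_instance

-- ===== CLAIM (what is proved, stated in full; the proofs are below) =====
def Claim_equal_ValidPair2 : Prop := ∀ (a : List Int) (n : Int), Dom_ValidPair2 a n → Pre_ValidPair2 a n → Spec_ValidPair2 a n (ValidPair2 a n)

-- ===== LEMMAS AND PROOFS =====

-- proof-side names for the two fold bodies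
def pvStepA (s : List Int) (res i : Int) : Int :=
  match PySem.List.pyGet? s i with
  | none => res
  | some v =>
    if v > 0 then
      let j := ValidPair2While s v (i - 1) (s.length + 2)
      res + (i - j - 1)
    else res

def pvStepB (s : List Int) (st : Int × Option Int) (i : Int) : Int × Option Int :=
  match PySem.List.pyGet? s i with
  | none => st
  | some v =>
    (if v > 0 ∧ st.2 ≠ some v then
       st.1 + (i - (PySem.List.bisectRight (s.take i.toNat) (-v) : Int))
     else st.1, some v)

lemma ValidPair2_eq_foldA (a : List Int) (n : Int) :
    ValidPair2 a n =
      (PySem.List.pyRange 0 n 1).foldl (pvStepA (PySem.List.sorted a (fun x => x) false)) 0 := rfl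

lemma ValidPair2_alt_eq_foldB (a : List Int) (n : Int) :
    ValidPair2_alt a n =
      ((PySem.List.pyRange 0 n 1).foldl (pvStepB (PySem.List.sorted a (fun x => x) false))
        ((0 : Int), (none : Option Int))).1 := rfl

-- the while loop, run from j = t-1 with r ≤ t ≤ k, stops at j = r-1
lemma pvWhile_run (s : List Int) (hs : s.Pairwise (· ≤ ·)) (k : Nat) (hk : k < s.length)
    (v : Int) (hv : 0 < v) (hvk : v ≤ s[k]) (r : Nat)
    (hblock : ∀ j : Nat, j < r → (hj : j < s.length) → s[j] ≤ -v)
    (hrun : ∀ j : Nat, r ≤ j → j < k → (hj : j < s.length) → -v < s[j] ∧ s[j] < v) :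
    ∀ fuel t : Nat, r ≤ t → t ≤ k → t - r < fuel →
      ValidPair2While s v ((t : Int) - 1) fuel = (r : Int) - 1 := by
  have hmono : ∀ (p q : Nat) (hp : p < s.length) (hq : q < s.length), p ≤ q → s[p] ≤ s[q] := by
    intro p q hp hq hpq
    rcases eq_or_lt_of_le hpq with h | h
    · subst h; rfl
    · exact List.pairwise_iff_getElem.mp hs p q hp hq h
  intro fuel
  induction fuel with
  | zero => intro t _ _ h; omega
  | succ fuel ih =>
    intro t htr htk hfuel
    rcases eq_or_lt_of_le htr with h | h
    · -- t = r: the element at j = r-1 (or the wrapped s[-1] when r = 0) blocks the loop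
      subst h
      by_cases hr : r = 0
      · have hne : s ≠ [] := List.ne_nil_of_length_pos (by omega)
        have hlast : PySem.List.pyGet? s ((r : Int) - 1) = some (s.getLast hne) := by
          rw [show ((r : Int) - 1) = (-1 : Int) by omega, PySem.List.pyGet?_neg_one,
            List.getLast?_eq_getLast_of_ne_nil hne]
        have hge : v ≤ s.getLast hne := by
          rw [List.getLast_eq_getElem]
          exact le_trans hvk (hmono k (s.length - 1) hk (by omega) (by omega))
        simp only [ValidPair2While, hlast]
        rw [if_neg (by rw [abs_of_pos (by omega)]; omega)]
      · have hr1 : r - 1 < s.length := by omega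
        have hget : PySem.List.pyGet? s ((r : Int) - 1) = some (s[r - 1]'hr1) := by
          rw [show ((r : Int) - 1) = ((r - 1 : Nat) : Int) by omega, PySem.List.pyGet?_natCast,
            List.getElem?_eq_getElem hr1]
        have hble : s[r - 1]'hr1 ≤ -v := hblock (r - 1) (by omega) hr1
        simp only [ValidPair2While, hget]
        rw [if_neg (by rw [abs_of_neg (by omega)]; omega)]
    · -- r < t: the element at j = t-1 is inside the run, the loop keeps going
      have hr1 : t - 1 < s.length := by omega
      have hget : PySem.List.pyGet? s ((t : Int) - 1) = some (s[t - 1]'hr1) := by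
        rw [show ((t : Int) - 1) = ((t - 1 : Nat) : Int) by omega, PySem.List.pyGet?_natCast,
          List.getElem?_eq_getElem hr1]
      obtain ⟨hlo, hhi⟩ := hrun (t - 1) (by omega) (by omega) hr1
      simp only [ValidPair2While, hget]
      rw [if_pos (abs_lt.mpr ⟨by omega, hhi⟩)]
      rw [show ((t : Int) - 1 - 1) = ((t - 1 : Nat) : Int) - 1 by omega]
      exact ih (t - 1) (by omega) (by omega) (by omega)

-- one matched step of the two loops
lemma pvStep_eq (s : List Int) (hs : s.Pairwise (· ≤ ·)) (m : Nat) (hm : m < s.length)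
    (res : Int) (pv : Option Int) (hpv : pv = if _h : m = 0 then none else some (s[m - 1]'(by omega))) :
    pvStepA s res (m : Int) = (pvStepB s (res, pv) (m : Int)).1 ∧
    (pvStepB s (res, pv) (m : Int)).2 = some s[m] := by
  have hmono : ∀ (p q : Nat) (hp : p < s.length) (hq : q < s.length), p ≤ q → s[p] ≤ s[q] := by
    intro p q hp hq hpq
    rcases eq_or_lt_of_le hpq with h | h
    · subst h; rfl
    · exact List.pairwise_iff_getElem.mp hs p q hp hq h
  have hget : PySem.List.pyGet? s ((m : Nat) : Int) = some s[m] := by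
    rw [PySem.List.pyGet?_natCast, List.getElem?_eq_getElem hm]
  by_cases hv : s[m] > 0
  · by_cases hdup : m ≠ 0 ∧ s[m - 1]'(by omega) = s[m]
    · -- duplicate of a positive value: A's while stops at once, B's prev test skips it
      obtain ⟨hm0, hdup⟩ := hdup
      have hr1 : m - 1 < s.length := by omega
      have hget1 : PySem.List.pyGet? s ((m : Int) - 1) = some (s[m - 1]'hr1) := by
        rw [show ((m : Int) - 1) = ((m - 1 : Nat) : Int) by omega, PySem.List.pyGet?_natCast,
          List.getElem?_eq_getElem hr1]
      have hwhile : ValidPair2While s s[m] ((m : Int) - 1) (s.length + 2) = (m : Int) - 1 := by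
        simp only [ValidPair2While, hget1]
        rw [if_neg (by rw [hdup, abs_of_pos hv]; omega)]
      have hpv' : pv = some s[m] := by rw [hpv, dif_neg hm0, hdup]
      refine ⟨?_, by simp [pvStepB, hget]⟩
      simp only [pvStepA, pvStepB, hget, hwhile, if_pos hv, hpv']
      rw [if_neg (by simp)]
      omega
    · -- first occurrence of a positive value: run = everything after the ≤ -v block
      have hless : ∀ (j : Nat), j < m → (hj : j < s.length) → s[j] < s[m] := by
        intro j hj hjs
        have h1 : s[j] ≤ s[m - 1]'(by omega) := hmono j (m - 1) hjs (by omega) (by omega)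
        have h2 : s[m - 1]'(by omega) ≤ s[m] := hmono (m - 1) m (by omega) hm (by omega)
        rcases Decidable.not_and_iff_not_or_not.mp hdup with h | h
        · omega
        · have : s[m - 1]'(by omega) ≠ s[m] := h
          omega
      set v := s[m] with hvdef
      set r := PySem.List.bisectRight (s.take m) (-v) with hrdef
      have htk : (s.take m).Pairwise (· ≤ ·) := hs.sublist (List.take_sublist m s)
      have hlentk : (s.take m).length = m := by simp; omega
      obtain ⟨hrle, hrlo, hrhi⟩ := PySem.List.bisectRight_spec (s.take m) (-v) htk
      rw [hlentk] at hrle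
      have hblock : ∀ (j : Nat), j < r → (hj : j < s.length) → s[j] ≤ -v := by
        intro j hj hjs
        have hjm : j < m := by omega
        have := hrlo j (by omega) hj
        rwa [List.getElem_take] at this
      have hrun : ∀ (j : Nat), r ≤ j → j < m → (hj : j < s.length) → -v < s[j] ∧ s[j] < v := by
        intro j hrj hjm hjs
        have := hrhi j (by omega) hrj
        rw [List.getElem_take] at this
        exact ⟨by omega, hless j hjm hjs⟩
      have hwhile := pvWhile_run s hs m hm v hv (le_refl _) r hblock hrun
        (s.length + 2) m (by omega) (le_refl _) (by omega)
      have hpv' : ¬ (pv = some v) := by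
        by_cases h0 : m = 0
        · rw [hpv, dif_pos h0]; simp
        · rw [hpv, dif_neg h0]
          simp only [Option.some.injEq]
          exact fun he => hdup ⟨h0, he⟩
      refine ⟨?_, by simp [pvStepB, hget]⟩
      simp only [pvStepA, pvStepB, hget, hwhile, if_pos hv]
      rw [if_pos ⟨hv, hpv'⟩]
      rw [show ((m : Nat) : Int).toNat = m by omega]
      rw [← hrdef]
      omega
  · refine ⟨?_, by simp [pvStepB, hget]⟩
    simp only [pvStepA, pvStepB, hget, if_neg hv]
    rw [if_neg (by intro h; exact hv h.1)]

-- the two folds agree over range(0, m) for every m ≤ len s, with B's prev tracking s[m-1]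
lemma pvFold_eq (s : List Int) (hs : s.Pairwise (· ≤ ·)) (m : Nat) (hm : m ≤ s.length) :
    (PySem.List.pyRange 0 (m : Int) 1).foldl (pvStepA s) 0 =
      ((PySem.List.pyRange 0 (m : Int) 1).foldl (pvStepB s) ((0 : Int), none)).1 ∧
    ((PySem.List.pyRange 0 (m : Int) 1).foldl (pvStepB s) ((0 : Int), none)).2 =
      (if h : m = 0 then none else some (s[m - 1]'(by omega))) := by
  induction m with
  | zero => simp [PySem.List.pyRange_one_eq_nil]
  | succ m ih =>
    have hm' : m ≤ s.length := by omega
    obtain ⟨ih1, ih2⟩ := ih hm'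
    have hsplit : PySem.List.pyRange 0 ((m + 1 : Nat) : Int) 1 =
        PySem.List.pyRange 0 (m : Int) 1 ++ [(m : Int)] := by
      push_cast
      exact PySem.List.pyRange_one_succ_right (by omega)
    rw [hsplit, List.foldl_append, List.foldl_append]
    simp only [List.foldl_cons, List.foldl_nil]
    obtain ⟨h1, h2⟩ := pvStep_eq s hs m (by omega)
      ((PySem.List.pyRange 0 (m : Int) 1).foldl (pvStepB s) ((0 : Int), none)).1
      ((PySem.List.pyRange 0 (m : Int) 1).foldl (pvStepB s) ((0 : Int), none)).2 ih2
    constructor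
    · rw [ih1]; exact h1
    · rw [h2]
      simp

-- ===== VERDICT (by name: the statement is the Claim_ definition above) =====
theorem ValidPair2_spec : Claim_equal_ValidPair2 := by
  intro a n _ hpre
  unfold Spec_ValidPair2
  rw [ValidPair2_eq_foldA, ValidPair2_alt_eq_foldB]
  set s := PySem.List.sorted a (fun x => x) false with hsdef
  have hs : s.Pairwise (· ≤ ·) := PySem.List.sorted_pairwise a (fun x => x)
  have hlen : s.length = a.length := PySem.List.length_sorted a (fun x => x) false
  rcases le_or_gt n 0 with hn | hn
  · rw [PySem.List.pyRange_one_eq_nil (by omega)]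
    simp
  · have hmn : n = ((n.toNat : Nat) : Int) := by omega
    rw [hmn]
    exact (pvFold_eq s hs n.toNat (by unfold Pre_ValidPair2 at hpre; omega)).1
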